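-- pv_equiv track=rewrite | github.com/KosuriLab/DropSynth | choose_lowest_A.py | best_A_content
-- ===== SOURCE A (Python) =====
-- def reverse_complement(seq):
-- 	'''
-- 	Returns the reverse complement of a sequence
-- 	'''
--
-- 	# reverse the sequence
-- 	rev = seq[::-1]
-- 	# create blank string
-- 	rc = ''
--
-- 	# for each letter in the reverse sequence
-- 	for nt in rev:
-- 		# add the complement
-- 		if nt == 'A':
-- 			rc += 'T'
-- 		elif nt == 'T':
-- 			rc += 'A'
-- 		elif nt == 'C':
-- 			rc += 'G'
-- 		else: # nt  == 'G'
-- 			rc += 'C'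
--
-- 	return rc
--
-- def best_A_content(oligo):
-- 	'''
-- 	Choose the strand with the lowest A content because A's are harder to
-- 	synthesize.
-- 	'''
--
-- 	# get the reverse compliment of the oligo
-- 	rc_oligo = reverse_complement(oligo)
--
-- 	# count the number of A's for both strands
-- 	oligo_As = sum( [1 for nt in oligo if nt == 'A'] )
-- 	rc_As = sum( [1 for nt in rc_oligo if nt == 'A'] )
--
-- 	# save the oligo with lower number of A's
-- 	if oligo_As < rc_As:
-- 		final_oligo = oligo
-- 	else:
-- 		final_oligo = rc_oligo
--
-- 	return final_oligo
-- ===== SOURCE B (Python) =====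
-- def best_A_content(oligo):
--     '''
--     Choose the strand with the lowest A content; single pass counting A's and
--     T's (the reverse complement's A-count is the original's T-count), and the
--     reverse complement is built only when it is the one returned.
--     '''
--     a_count = 0
--     t_count = 0
--     for nt in oligo:
--         if nt == 'A':
--             a_count += 1
--         elif nt == 'T':
--             t_count += 1
--     if a_count < t_count:
--         return oligo
--     comp = ['T' if nt == 'A' else 'A' if nt == 'T' else 'G' if nt == 'C' else 'C'
--             for nt in oligo]
--     return ''.join(reversed(comp))
-- ===== Notes on version B (the rewrite author's own statement) =====
-- stated objective: alternative
-- what changed: B makes one pass counting A's and T's (using that the reverse complement's A-count equals the original's T-count) and builds the reverse complement, as a forward complement list joined in reverse, only in the branch that returns it; A always materializes the reverse complement and counts A's on both strands.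
import Mathlib
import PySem

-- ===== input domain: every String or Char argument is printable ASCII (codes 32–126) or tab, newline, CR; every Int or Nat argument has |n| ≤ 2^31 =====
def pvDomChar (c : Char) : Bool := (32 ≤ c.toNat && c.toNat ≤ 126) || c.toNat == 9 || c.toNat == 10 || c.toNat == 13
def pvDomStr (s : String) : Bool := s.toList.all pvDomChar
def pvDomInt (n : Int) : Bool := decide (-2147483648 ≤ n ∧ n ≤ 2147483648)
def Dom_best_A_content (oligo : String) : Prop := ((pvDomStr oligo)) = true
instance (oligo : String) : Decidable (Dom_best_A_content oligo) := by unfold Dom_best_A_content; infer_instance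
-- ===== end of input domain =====

-- B counts A's and T's in one pass and builds the reverse complement (forward complement list, reversed) only when it is returned; A always builds it and counts A's on both strands. Same value everywhere.

-- ===== PORT A =====
-- rc += ('T'|'A'|'G'|'C') branch chain of reverse_complement
def pvCompA (nt : Char) : Char :=
  if nt == 'A' then 'T' else if nt == 'T' then 'A' else if nt == 'C' then 'G' else 'C'

def reverse_complement (seq : String) : String :=
  -- rev = seq[::-1]  (string reversal, exact)
  let rev := seq.toList.reverse
  -- for nt in rev: rc += complement(nt)
  let rc := rev.foldl (fun rc nt => rc ++ [pvCompA nt]) []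
  String.ofList rc

def best_A_content (oligo : String) : String :=
  let rc_oligo := reverse_complement oligo
  -- sum([1 for nt in … if nt == 'A'])
  let oligo_As : Int := ((oligo.toList.filter (fun nt => nt == 'A')).map (fun _ => (1 : Int))).sum
  let rc_As : Int := ((rc_oligo.toList.filter (fun nt => nt == 'A')).map (fun _ => (1 : Int))).sum
  if oligo_As < rc_As then oligo else rc_oligo

-- ===== PORT B =====
def best_A_content_alt (oligo : String) : String :=
  let p := oligo.toList.foldl
    (fun (p : Int × Int) nt =>
      if nt == 'A' then (p.1 + 1, p.2) else if nt == 'T' then (p.1, p.2 + 1) else p)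
    (0, 0)
  if p.1 < p.2 then oligo
  else
    -- comp = [complement(nt) for nt in oligo]; ''.join(reversed(comp))
    String.ofList ((oligo.toList.map
      (fun nt =>
        if nt == 'A' then 'T' else if nt == 'T' then 'A' else if nt == 'C' then 'G' else 'C')).reverse)

-- ===== PRECONDITION & SPEC =====
def Spec_best_A_content (oligo : String) (out : String) : Prop := out = best_A_content_alt oligo
instance (oligo : String) (out : String) : Decidable (Spec_best_A_content oligo out) := by unfold Spec_best_A_content; infer_instance

-- ===== CLAIM (what is proved, stated in full; the proofs are below) =====
def Claim_equal_best_A_content : Prop := ∀ (oligo : String), Dom_best_A_content oligo → Spec_best_A_content oligo (best_A_content oligo)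

-- ===== LEMMAS AND PROOFS =====

theorem foldl_app_map (xs : List Char) (acc : List Char) :
    xs.foldl (fun rc nt => rc ++ [pvCompA nt]) acc = acc ++ xs.map pvCompA := by
  induction xs generalizing acc with
  | nil => simp [List.foldl]
  | cons x xs ih => simp only [List.foldl_cons, ih]; simp

theorem sum_map_one (xs : List Char) : (xs.map (fun _ => (1 : Int))).sum = (xs.length : Int) := by
  induction xs with
  | nil => simp
  | cons x xs ih => simp [ih]; ring

theorem pair_fold (xs : List Char) (a t : Int) :
    xs.foldl (fun (p : Int × Int) nt =>
      if nt == 'A' then (p.1 + 1, p.2) else if nt == 'T' then (p.1, p.2 + 1) else p) (a, t)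
    = (a + ((xs.filter (fun nt => nt == 'A')).length : Int),
       t + ((xs.filter (fun nt => nt == 'T')).length : Int)) := by
  induction xs generalizing a t with
  | nil => simp
  | cons x xs ih =>
    rw [List.foldl_cons]
    by_cases hA : x = 'A'
    · rw [if_pos (by simp [hA]), ih]
      refine Prod.ext ?_ ?_ <;> simp [hA] <;> push_cast <;> ring
    · by_cases hT : x = 'T'
      · rw [if_neg (by simp [hA]), if_pos (by simp [hT]), ih]
        refine Prod.ext ?_ ?_ <;> simp [hA, hT] <;> push_cast <;> ring
      · rw [if_neg (by simp [hA]), if_neg (by simp [hT]), ih]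
        simp [List.filter_cons, hA, hT]

theorem countA_map_comp (xs : List Char) :
    ((xs.map pvCompA).filter (fun nt => nt == 'A')).length
      = (xs.filter (fun nt => nt == 'T')).length := by
  induction xs with
  | nil => simp
  | cons x xs ih =>
    by_cases hT : x = 'T'
    · simp [pvCompA, hT, List.filter, ih]
    · have h : pvCompA x ≠ 'A' := by
        unfold pvCompA
        by_cases h1 : x = 'A' <;> by_cases h2 : x = 'C' <;> simp [h1, h2, hT]
      simp [hT, h, ih]

-- ===== VERDICT (by name: the statement is the Claim_ definition above) =====
theorem best_A_content_spec : Claim_equal_best_A_content := by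
  intro oligo _
  unfold Spec_best_A_content best_A_content best_A_content_alt reverse_complement
  simp only [foldl_app_map, List.nil_append, pair_fold]
  have hrc : (String.ofList ((oligo.toList.reverse).map pvCompA)).toList
      = (oligo.toList.reverse).map pvCompA := String.toList_ofList
  rw [hrc]
  have hcount : (((oligo.toList.reverse).map pvCompA).filter (fun nt => nt == 'A')).length
      = ((oligo.toList.filter (fun nt => nt == 'T')).length) := by
    rw [countA_map_comp]
    simp [List.filter_reverse]
  rw [sum_map_one, sum_map_one, hcount]
  simp only [zero_add]
  split_ifs with h
  · rfl
  · have hcomp : (fun (nt : Char) =>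
        if nt == 'A' then 'T' else if nt == 'T' then 'A' else if nt == 'C' then 'G' else 'C') = pvCompA := rfl
    rw [hcomp, List.map_reverse]
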